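-- pv_equiv track=rewrite | github.com/JonJWong/simfile-sidekick | src/scan/scanutils.py | find_starting_foot
-- ===== SOURCE A (Python) =====
-- def first_left_right(pattern):
--     """
--         Takes in a string as a pattern/, and returns the index of the
--         first instance of "L" or "R". Returns -1 if no L/R
--     """
--     first_L = pattern.find("L")
--     first_R = pattern.find("R")
--
--     if first_L == -1 and first_R == -1:
--         return -1
--     elif first_L == -1:
--         return first_R
--     elif first_R == -1:
--         return first_L
--
--     return first_L if first_L < first_R else first_R
--
-- def find_starting_foot(pattern):
--     """
--         Takes in a string as a pattern/, and returns "L", "R" according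
--         to which foot starts the run. Returns -1 if there are no L/R
--         in the input.
--     """
--     first_lr = first_left_right(pattern)
--     if first_lr == -1:
--         return -1
--
--     starting_foot = pattern[first_lr]
--
--     for i in reversed(range(1, first_lr)):
--         if pattern[i] != pattern[i-1]:
--             starting_foot = "L" if starting_foot == "R" else "R"
--
--     return starting_foot
-- ===== SOURCE B (Python) =====
-- def find_starting_foot(pattern):
--     prev = None
--     flips = False
--     for c in pattern:
--         if c == 'L' or c == 'R':
--             if flips:
--                 return 'R' if c == 'L' else 'L'
--             return c
--         if prev is not None and c != prev:
--             flips = not flips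
--         prev = c
--     return -1
-- ===== Notes on version B (the rewrite author's own statement) =====
-- stated objective: alternative
-- what changed: Replaces the two str.find scans plus the reversed index loop by a single forward pass over the characters that stops at the first left/right step while tracking the parity of adjacent differences in the prefix.
-- outside the precondition, e.g. on find_starting_foot('UD'): A returns -1, B returns -1
import Mathlib
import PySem

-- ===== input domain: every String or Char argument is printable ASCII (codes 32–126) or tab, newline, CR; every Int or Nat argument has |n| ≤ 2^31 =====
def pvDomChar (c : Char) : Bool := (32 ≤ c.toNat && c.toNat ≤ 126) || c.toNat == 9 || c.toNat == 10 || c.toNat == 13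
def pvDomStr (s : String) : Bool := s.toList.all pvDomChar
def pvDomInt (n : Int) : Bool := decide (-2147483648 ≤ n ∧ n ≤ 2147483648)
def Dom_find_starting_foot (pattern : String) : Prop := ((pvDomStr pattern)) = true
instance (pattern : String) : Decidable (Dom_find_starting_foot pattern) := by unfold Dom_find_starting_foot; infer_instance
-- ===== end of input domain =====

-- B replaces A's two str.find scans and reversed index loop by one forward pass that
-- stops at the first L/R while tracking the parity of adjacent differences (alternative
-- decomposition, same asymptotic cost).

-- ===== PORT A =====
def first_left_right (pattern : String) : Int :=
  let firstL := PySem.Str.find pattern "L"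
  let firstR := PySem.Str.find pattern "R"
  if firstL = -1 ∧ firstR = -1 then -1
  else if firstL = -1 then firstR
  else if firstR = -1 then firstL
  else if firstL < firstR then firstL else firstR

def find_starting_foot (pattern : String) : String :=
  let firstLr := first_left_right pattern
  if firstLr = -1 then "-1"  -- Python returns the int -1 here, not a string: outside Pre_
  else
    -- pattern[first_lr] is a one-character string (Str.pyGet? yields the Char; in range inside Pre_)
    let startingFoot :=
      match PySem.Str.pyGet? pattern firstLr with
      | some ch => String.ofList [ch]
      | none => ""   -- unreachable inside Pre_
    ((PySem.List.pyRange 1 firstLr 1).reverse).foldl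
      (fun sf i =>
        if PySem.Str.pyGet? pattern i ≠ PySem.Str.pyGet? pattern (i - 1) then
          (if sf = "R" then "L" else "R")
        else sf)
      startingFoot

-- ===== PORT B =====
def fsfGo : List Char → Option Char → Bool → String
  | [], _, _ => "-1"  -- Python B returns the int -1 here: outside Pre_
  | c :: rest, prev, flips =>
    if c = 'L' ∨ c = 'R' then
      if flips then (if c = 'L' then "R" else "L") else String.ofList [c]
    else
      fsfGo rest (some c)
        (match prev with
         | some p => if c ≠ p then !flips else flips
         | none => flips)

def find_starting_foot_alt (pattern : String) : String :=
  fsfGo pattern.toList none false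

-- ===== PRECONDITION & SPEC =====
-- Pre_ excludes exactly the patterns containing no left/right step character: there
-- Python A (and B) return the int -1, not a value of the declared string result type.
def Pre_find_starting_foot (pattern : String) : Prop :=
  'L' ∈ pattern.toList ∨ 'R' ∈ pattern.toList
instance (pattern : String) : Decidable (Pre_find_starting_foot pattern) := by
  unfold Pre_find_starting_foot; infer_instance

def pvWitness_find_starting_foot : String := "UDLR"

def Spec_find_starting_foot (pattern : String) (out : String) : Prop := out = find_starting_foot_alt pattern
instance (pattern : String) (out : String) : Decidable (Spec_find_starting_foot pattern out) := by unfold Spec_find_starting_foot; infer_instance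

-- ===== CLAIM (what is proved, stated in full; the proofs are below) =====
def Claim_equal_find_starting_foot : Prop := ∀ (pattern : String), Dom_find_starting_foot pattern → Pre_find_starting_foot pattern → Spec_find_starting_foot pattern (find_starting_foot pattern)

-- ===== LEMMAS AND PROOFS =====

-- number of adjacent differences in a list of characters
def diffCount : List Char → Nat
  | [] => 0
  | [_] => 0
  | x :: y :: t => (if x = y then 0 else 1) + diffCount (y :: t)

-- first-occurrence decomposition of a pattern satisfying Pre_
lemma exists_first_split (l : List Char) (h : 'L' ∈ l ∨ 'R' ∈ l) :
    ∃ pre c suf, l = pre ++ c :: suf ∧ (c = 'L' ∨ c = 'R') ∧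
      ∀ x ∈ pre, ¬(x = 'L' ∨ x = 'R') := by
  induction l with
  | nil => simp at h
  | cons a t ih =>
    by_cases ha : a = 'L' ∨ a = 'R'
    · exact ⟨[], a, t, by simp, ha, by simp⟩
    · have ht : 'L' ∈ t ∨ 'R' ∈ t := by
        push Not at ha
        rcases h with h | h <;> rcases List.mem_cons.1 h with rfl | h
        · exact absurd rfl ha.1
        · exact Or.inl h
        · exact absurd rfl ha.2
        · exact Or.inr h
      obtain ⟨pre, c, suf, h1, h2, h3⟩ := ih ht
      exact ⟨a :: pre, c, suf, by simp [h1], h2, by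
        intro x hx; rcases List.mem_cons.1 hx with rfl | hx
        · exact ha
        · exact h3 x hx⟩

lemma singleton_prefix_iff (d : Char) (t : List Char) : [d] <+: t ↔ t.head? = some d := by
  cases t <;> simp [List.cons_prefix_cons, eq_comm]

lemma singleton_prefix_drop_iff (l : List Char) (d : Char) (i : Nat) :
    [d] <+: l.drop i ↔ l[i]? = some d := by
  rw [singleton_prefix_iff, List.head?_drop]

-- Chars.find of the single char standing at the first-occurrence position
lemma find_char_eq (pre suf : List Char) (d : Char) (h : ∀ x ∈ pre, x ≠ d) :
    PySem.Chars.find (pre ++ d :: suf) [d] = (pre.length : Int) := by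
  set l := pre ++ d :: suf with hl
  have hmem : [d] <:+: l := ⟨pre, suf, by simp [hl]⟩
  have hnn : 0 ≤ PySem.Chars.find l [d] := (PySem.Chars.find_nonneg_iff l [d]).2 hmem
  obtain ⟨h1, h2⟩ := PySem.Chars.find_spec hnn
  set k := (PySem.Chars.find l [d]).toNat with hk
  have hkd : l[k]? = some d := (singleton_prefix_drop_iff l d k).1 h1
  have hprej : l[pre.length]? = some d := by
    rw [hl, List.getElem?_append_right (le_refl _)]
    simp
  have hkle : k ≤ pre.length := by
    by_contra hgt
    exact h2 pre.length (by omega) ((singleton_prefix_drop_iff l d pre.length).2 hprej)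
  have hklt : ¬ k < pre.length := by
    intro hlt
    have : l[k]? = pre[k]? := by
      rw [hl, List.getElem?_append_left hlt]
    rw [this] at hkd
    have : pre[k] = d := by
      obtain ⟨hh, he⟩ := List.getElem?_eq_some_iff.1 hkd
      exact he
    exact h _ (List.getElem_mem _) this
  have : k = pre.length := by omega
  omega

-- Chars.find of the OTHER char: absent, or strictly past the first-occurrence position
lemma find_char_ne (pre suf : List Char) (c d : Char) (h : ∀ x ∈ pre, x ≠ d) (hcd : c ≠ d) :
    PySem.Chars.find (pre ++ c :: suf) [d] = -1 ∨
      (pre.length : Int) < PySem.Chars.find (pre ++ c :: suf) [d] := by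
  set l := pre ++ c :: suf with hl
  by_cases hmem : [d] <:+: l
  · right
    have hnn : 0 ≤ PySem.Chars.find l [d] := (PySem.Chars.find_nonneg_iff l [d]).2 hmem
    obtain ⟨h1, h2⟩ := PySem.Chars.find_spec hnn
    set k := (PySem.Chars.find l [d]).toNat with hk
    have hkd : l[k]? = some d := (singleton_prefix_drop_iff l d k).1 h1
    have : ¬ k ≤ pre.length := by
      intro hle
      rcases Nat.lt_or_ge k pre.length with hlt | hge
      · have : l[k]? = pre[k]? := by rw [hl, List.getElem?_append_left hlt]
        rw [this] at hkd
        obtain ⟨hh, he⟩ := List.getElem?_eq_some_iff.1 hkd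
        exact h _ (List.getElem_mem _) he
      · have hkeq : k = pre.length := by omega
        have : l[k]? = some c := by
          rw [hl, hkeq, List.getElem?_append_right (le_refl _)]; simp
        rw [this] at hkd
        exact hcd (by injection hkd)
    omega
  · left
    exact (PySem.Chars.find_eq_neg_one_iff l [d]).2 hmem

lemma first_left_right_eq (pre suf : List Char) (c : Char) (pattern : String)
    (hl : pattern.toList = pre ++ c :: suf) (hc : c = 'L' ∨ c = 'R')
    (hpre : ∀ x ∈ pre, ¬(x = 'L' ∨ x = 'R')) :
    first_left_right pattern = (pre.length : Int) := by
  have hpL : ∀ x ∈ pre, x ≠ 'L' := fun x hx => fun he => hpre x hx (Or.inl he)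
  have hpR : ∀ x ∈ pre, x ≠ 'R' := fun x hx => fun he => hpre x hx (Or.inr he)
  unfold first_left_right
  simp only [PySem.Str.find_eq, hl]
  rw [show "L".toList = ['L'] from rfl, show "R".toList = ['R'] from rfl]
  rcases hc with rfl | rfl
  · have h1 := find_char_eq pre suf 'L' hpL
    rcases find_char_ne pre suf 'L' 'R' hpR (by decide) with h2 | h2 <;>
      simp only [h1, h2] <;> split_ifs <;> first | omega | tauto
  · have h1 := find_char_eq pre suf 'R' hpR
    rcases find_char_ne pre suf 'R' 'L' hpL (by decide) with h2 | h2 <;>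
      simp only [h1, h2] <;> split_ifs <;> first | omega | tauto

-- A's toggle loop computes flip^(number of indices satisfying cond)
lemma flipFold (cond : Int → Prop) [DecidablePred cond] (I : List Int) :
    ∀ (s : String), (s = "L" ∨ s = "R") →
    I.foldl (fun sf i => if cond i then (if sf = "R" then "L" else "R") else sf) s
      = if (I.countP fun i => decide (cond i)) % 2 = 1
        then (if s = "R" then "L" else "R") else s := by
  induction I with
  | nil => intro s hs; simp
  | cons a t ih =>
    intro s hs
    simp only [List.foldl_cons, List.countP_cons]
    by_cases hca : cond a
    · rw [if_pos hca]
      have hs' : (if s = "R" then "L" else "R") = "L" ∨ (if s = "R" then "L" else "R") = "R" := by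
        rcases hs with rfl | rfl <;> simp
      rw [ih _ hs']
      simp only [hca, decide_true]
      rcases hs with rfl | rfl <;> by_cases hp : t.countP (fun i => decide (cond i)) % 2 = 1 <;>
        simp [hp] <;> omega
    · rw [if_neg hca, ih _ hs]
      simp [hca]

lemma diffCount_snoc (ys : List Char) (y z : Char) (hz : ys.getLast? = some z) :
    diffCount (ys ++ [y]) = diffCount ys + (if z = y then 0 else 1) := by
  induction ys generalizing z with
  | nil => simp at hz
  | cons x t ih =>
    cases t with
    | nil =>
      simp only [List.getLast?_singleton, Option.some.injEq] at hz
      subst hz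
      simp [diffCount]
    | cons w t' =>
      have hz' : (w :: t').getLast? = some z := by
        rwa [List.getLast?_cons_cons] at hz
      rw [show (x :: w :: t') ++ [y] = x :: ((w :: t') ++ [y]) by simp]
      show (if x = w then 0 else 1) + diffCount ((w :: t') ++ [y]) = _
      rw [ih z hz']
      show _ = (if x = w then 0 else 1) + diffCount (w :: t') + _
      omega

-- the count of indices i in range(1, len(pre)) with l[i] != l[i-1] is diffCount pre
lemma countRange (pre : List Char) : ∀ (rest : List Char),
    ((PySem.List.pyRange 1 (pre.length : Int) 1).countP fun i =>
        decide (¬ PySem.Chars.pyGet? (pre ++ rest) i = PySem.Chars.pyGet? (pre ++ rest) (i - 1)))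
      = diffCount pre := by
  induction pre using List.reverseRecOn with
  | nil => intro rest; simp [PySem.List.pyRange_one_eq_nil, diffCount]
  | append_singleton ys y ih =>
    intro rest
    cases ys with
    | nil =>
      simp [PySem.List.pyRange_one_eq_nil, diffCount]
    | cons w t =>
      set ys := w :: t with hys
      have hn : 1 ≤ (ys.length : Int) := by simp [hys]
      have hlen : (((ys ++ [y]).length : Int)) = (ys.length : Int) + 1 := by simp
      rw [hlen, PySem.List.pyRange_one_succ_right hn, List.countP_append]
      rw [show (ys ++ [y]) ++ rest = ys ++ ([y] ++ rest) by simp, ih ([y] ++ rest)]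
      obtain ⟨z, hz⟩ : ∃ z, ys.getLast? = some z :=
        ⟨ys.getLast (by simp [hys]), List.getLast?_eq_some_getLast (by simp [hys])⟩
      rw [diffCount_snoc ys y z hz]
      congr 1
      simp only [List.countP_cons, List.countP_nil]
      have h1 : PySem.Chars.pyGet? (ys ++ ([y] ++ rest)) (ys.length : Int) = some y := by
        rw [show PySem.Chars.pyGet? = PySem.List.pyGet? from rfl, PySem.List.pyGet?_natCast,
          List.getElem?_append_right (le_refl _)]
        simp
      have h2 : PySem.Chars.pyGet? (ys ++ ([y] ++ rest)) ((ys.length : Int) - 1)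
          = some z := by
        have hlp : 0 < ys.length := by simp [hys]
        have hcast : ((ys.length : Int) - 1) = ((ys.length - 1 : Nat) : Int) := by
          push_cast [hlp]; omega
        rw [show PySem.Chars.pyGet? = PySem.List.pyGet? from rfl, hcast, PySem.List.pyGet?_natCast,
          List.getElem?_append_left (by omega)]
        rw [← List.getLast?_eq_getElem?]
        exact hz
      rw [h1, h2]
      by_cases hzy : z = y
      · subst hzy; simp
      · have hyz : ¬ (y = z) := fun h => hzy h.symm
        simp [hzy, hyz]

-- B's pass over the prefix accumulates exactly the diffCount parity of prev :: prefix
lemma fsfGo_some (pre : List Char) :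
    ∀ (c : Char) (suf : List Char), (∀ x ∈ pre, ¬(x = 'L' ∨ x = 'R')) → (c = 'L' ∨ c = 'R') →
    ∀ (p : Char) (b : Bool),
    fsfGo (pre ++ c :: suf) (some p) b
      = (if xor b (decide (diffCount (p :: pre) % 2 = 1))
         then (if c = 'L' then "R" else "L") else String.ofList [c]) := by
  induction pre with
  | nil =>
    intro c suf _ hc p b
    show fsfGo (c :: suf) (some p) b = _
    rw [fsfGo, if_pos hc]
    simp [diffCount]
  | cons x t ih =>
    intro c suf hpre hc p b
    have hx : ¬(x = 'L' ∨ x = 'R') := hpre x (by simp)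
    show fsfGo (x :: (t ++ c :: suf)) (some p) b = _
    rw [fsfGo, if_neg hx]
    rw [ih c suf (fun z hz => hpre z (by simp [hz])) hc]
    rw [show diffCount (p :: x :: t) = (if p = x then 0 else 1) + diffCount (x :: t) from rfl]
    by_cases hpx : p = x
    · simp [hpx]
    · have hxp : ¬ x = p := fun h => hpx h.symm
      rw [if_neg hpx]
      by_cases hq : diffCount (x :: t) % 2 = 1
      · have h1 : ¬ ((1 + diffCount (x :: t)) % 2 = 1) := by omega
        simp [hxp, hq, h1]
      · have h1 : (1 + diffCount (x :: t)) % 2 = 1 := by omega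
        simp [hxp, hq, h1]

lemma fsfGo_none (pre : List Char) (c : Char) (suf : List Char)
    (hpre : ∀ x ∈ pre, ¬(x = 'L' ∨ x = 'R')) (hc : c = 'L' ∨ c = 'R') :
    fsfGo (pre ++ c :: suf) none false
      = (if diffCount pre % 2 = 1 then (if c = 'L' then "R" else "L") else String.ofList [c]) := by
  cases pre with
  | nil =>
    show fsfGo (c :: suf) none false = _
    rw [fsfGo, if_pos hc]
    simp [diffCount]
  | cons x t =>
    show fsfGo (x :: (t ++ c :: suf)) none false = _
    rw [fsfGo, if_neg (hpre x (by simp))]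
    rw [fsfGo_some t c suf (fun z hz => hpre z (by simp [hz])) hc x false]
    simp

-- ===== VERDICT (by name: the statement is the Claim_ definition above) =====
theorem find_starting_foot_spec : Claim_equal_find_starting_foot := by
  intro pattern _ hpre
  unfold Spec_find_starting_foot
  obtain ⟨pre, c, suf, hl, hc, hpre'⟩ := exists_first_split pattern.toList hpre
  -- B's value
  have hB : find_starting_foot_alt pattern
      = (if diffCount pre % 2 = 1 then (if c = 'L' then "R" else "L") else String.ofList [c]) := by
    unfold find_starting_foot_alt
    rw [hl]
    exact fsfGo_none pre c suf hpre' hc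
  -- A's value
  have hflr := first_left_right_eq pre suf c pattern hl hc hpre'
  have hA : find_starting_foot pattern
      = (if diffCount pre % 2 = 1
         then (if String.ofList [c] = "R" then "L" else "R") else String.ofList [c]) := by
    unfold find_starting_foot
    rw [hflr, if_neg (by omega)]
    have hget : PySem.Str.pyGet? pattern (pre.length : Int) = some c := by
      rw [PySem.Str.pyGet?_eq, hl,
        show PySem.Chars.pyGet? = PySem.List.pyGet? from rfl, PySem.List.pyGet?_natCast,
        List.getElem?_append_right (le_refl _)]
      simp
    rw [hget]
    have hsc : String.ofList [c] = "L" ∨ String.ofList [c] = "R" := by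
      rcases hc with rfl | rfl
      · exact Or.inl rfl
      · exact Or.inr rfl
    rw [flipFold (fun i => ¬ PySem.Str.pyGet? pattern i = PySem.Str.pyGet? pattern (i - 1))
      _ (String.ofList [c]) hsc]
    rw [List.countP_reverse]
    have hcnt : ((PySem.List.pyRange 1 (pre.length : Int) 1).countP fun i =>
        decide (¬ PySem.Str.pyGet? pattern i = PySem.Str.pyGet? pattern (i - 1)))
        = diffCount pre := by
      rw [← countRange pre (c :: suf)]
      apply List.countP_congr
      intro i _
      rw [PySem.Str.pyGet?_eq, PySem.Str.pyGet?_eq, hl]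
    rw [hcnt]
  rw [hA, hB]
  rcases hc with rfl | rfl
  · rw [show String.ofList ['L'] = "L" from rfl]
    split_ifs <;> simp_all
  · rw [show String.ofList ['R'] = "R" from rfl]
    split_ifs <;> simp_all
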